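-- pv_equiv track=rewrite | github.com/ImranParthiib/Python-Odyssey | Codeforces/turtleMath.py | is_divisible_by_3
-- ===== SOURCE A (Python) =====
-- def is_divisible_by_3(arr):
--     total_sum = sum(arr)
--     if total_sum % 3 == 0:
--         return True
--
--     for i in range(len(arr)):
--         temp_arr = arr[:i] + arr[i+1:]
--         if sum(temp_arr) % 3 == 0:
--             return True
--
--     return False
-- ===== SOURCE B (Python) =====
-- def is_divisible_by_3(arr):
--     total = sum(arr)
--     return total % 3 == 0 or any((total - x) % 3 == 0 for x in arr)
-- ===== Notes on version B (the rewrite author's own statement) =====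
-- stated objective: faster
-- what changed: compute the total once and test (total - x) % 3 per element instead of rebuilding and re-summing a sliced copy of the list for every index
import Mathlib
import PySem

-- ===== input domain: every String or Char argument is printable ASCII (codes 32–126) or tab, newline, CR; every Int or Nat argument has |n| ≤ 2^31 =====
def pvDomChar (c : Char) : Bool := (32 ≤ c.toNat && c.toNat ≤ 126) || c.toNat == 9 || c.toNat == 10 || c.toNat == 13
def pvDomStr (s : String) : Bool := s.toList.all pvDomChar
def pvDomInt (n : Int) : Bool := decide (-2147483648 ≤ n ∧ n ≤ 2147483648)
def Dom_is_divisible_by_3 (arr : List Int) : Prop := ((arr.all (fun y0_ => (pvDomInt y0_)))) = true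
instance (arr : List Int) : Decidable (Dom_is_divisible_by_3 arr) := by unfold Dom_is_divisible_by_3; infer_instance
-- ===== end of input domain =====

-- B computes the total once and checks (total - x) % 3 per element (O(n)), instead of
-- A's per-index slice-and-resum (O(n^2)).

-- ===== PORT A =====
def is_divisible_by_3 (arr : List Int) : Bool :=
  let total_sum := arr.sum
  if PySem.Int.mod total_sum 3 == 0 then true
  else
    (PySem.List.pyRange 0 (arr.length : Int) 1).any (fun i =>
      PySem.Int.mod ((PySem.List.slice arr none (some i) ++
                      PySem.List.slice arr (some (i + 1)) none).sum) 3 == 0)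

-- ===== PORT B =====
def is_divisible_by_3_alt (arr : List Int) : Bool :=
  let total := arr.sum
  (PySem.Int.mod total 3 == 0) || arr.any (fun x => PySem.Int.mod (total - x) 3 == 0)

-- ===== PRECONDITION & SPEC =====
def Spec_is_divisible_by_3 (arr : List Int) (out : Bool) : Prop := out = is_divisible_by_3_alt arr
instance (arr : List Int) (out : Bool) : Decidable (Spec_is_divisible_by_3 arr out) := by unfold Spec_is_divisible_by_3; infer_instance

-- ===== CLAIM (what is proved, stated in full; the proofs are below) =====
def Claim_equal_is_divisible_by_3 : Prop := ∀ (arr : List Int), Dom_is_divisible_by_3 arr → Spec_is_divisible_by_3 arr (is_divisible_by_3 arr)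

-- ===== LEMMAS AND PROOFS =====

-- sum of the list with index k removed equals total minus arr[k]
theorem pv_sum_take_drop (arr : List Int) (k : Nat) (h : k < arr.length) :
    (arr.take k).sum + (arr.drop (k + 1)).sum = arr.sum - arr[k] := by
  induction arr generalizing k with
  | nil => simp at h
  | cons a t ih =>
    cases k with
    | zero => simp
    | succ k =>
      have h' : k < t.length := by simpa using h
      have := ih k h'
      simp only [List.take_succ_cons, List.drop_succ_cons, List.sum_cons, List.getElem_cons_succ]
      omega

theorem pv_main (arr : List Int) : is_divisible_by_3 arr = is_divisible_by_3_alt arr := by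
  unfold is_divisible_by_3 is_divisible_by_3_alt
  dsimp only
  by_cases h : (PySem.Int.mod arr.sum 3 == 0) = true
  · rw [if_pos h, h, Bool.true_or]
  · have hf : (PySem.Int.mod arr.sum 3 == 0) = false := by
      exact Bool.not_eq_true _ ▸ Bool.eq_false_iff.mpr (fun hc => h hc)
    rw [if_neg h, hf, Bool.false_or]
    rw [Bool.eq_iff_iff]
    simp only [List.any_eq_true, PySem.List.mem_pyRange_one]
    constructor
    · rintro ⟨i, ⟨h0, hlt⟩, hP⟩
      have hk : i.toNat < arr.length := by omega
      refine ⟨arr[i.toNat], List.getElem_mem hk, ?_⟩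
      rw [PySem.List.slice_to arr h0, PySem.List.slice_from arr (by omega)] at hP
      have h1 : (i + 1).toNat = i.toNat + 1 := by omega
      rw [h1, List.sum_append, pv_sum_take_drop arr i.toNat hk] at hP
      exact hP
    · rintro ⟨x, hx, hP⟩
      obtain ⟨k, hk, rfl⟩ := List.getElem_of_mem hx
      refine ⟨(k : Int), ⟨by positivity, by exact_mod_cast hk⟩, ?_⟩
      rw [PySem.List.slice_to arr (by positivity), PySem.List.slice_from arr (by positivity)]
      have h1 : ((k : Int) + 1).toNat = k + 1 := by omega
      have h0 : ((k : Int)).toNat = k := by omega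
      rw [h1, h0, List.sum_append, pv_sum_take_drop arr k hk]
      exact hP

-- ===== VERDICT (by name: the statement is the Claim_ definition above) =====
theorem is_divisible_by_3_spec : Claim_equal_is_divisible_by_3 := by
  intro arr _
  unfold Spec_is_divisible_by_3
  exact pv_main arr
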